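-- pv_equiv track=rewrite | github.com/rsarwas/aoc | 2015-05/answers.py | at_least_three_vowels
-- ===== SOURCE A (Python) =====
-- def at_least_three_vowels(line):
--     vowel_count = 0
--     vowels = ["a", "e", "i", "o", "u"]
--     for char in line:
--         if char in vowels:
--             vowel_count += 1
--             if vowel_count == 3:
--                 return True
--     return False
-- ===== SOURCE B (Python) =====
-- def at_least_three_vowels(line):
--     return sum(line.count(v) for v in "aeiou") >= 3
-- ===== Notes on version B (the rewrite author's own statement) =====
-- stated objective: idiomatic
-- what changed: B replaces A's single early-exit character loop with a running counter by one idiomatic line that sums line.count(v) over the five vowels and compares the total to 3.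
import Mathlib
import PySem

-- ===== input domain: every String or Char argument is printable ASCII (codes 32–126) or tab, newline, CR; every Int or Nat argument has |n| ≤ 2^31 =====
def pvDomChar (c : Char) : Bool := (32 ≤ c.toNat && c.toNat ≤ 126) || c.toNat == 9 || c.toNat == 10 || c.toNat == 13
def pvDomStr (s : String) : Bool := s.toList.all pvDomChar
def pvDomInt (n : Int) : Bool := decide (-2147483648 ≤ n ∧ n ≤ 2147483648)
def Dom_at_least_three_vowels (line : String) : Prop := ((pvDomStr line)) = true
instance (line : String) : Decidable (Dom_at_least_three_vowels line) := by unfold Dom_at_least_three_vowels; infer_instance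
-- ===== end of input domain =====

-- B replaces A's early-exit character loop by summing line.count(v) over the five vowels (idiomatic one-liner).

-- ===== PORT A =====
-- the early-exit loop over the characters, carrying the running vowel_count
def pvLoopA : List Char → Int → Bool
  | [], _ => false
  | ch :: rest, cnt =>
    if ch ∈ (['a', 'e', 'i', 'o', 'u'] : List Char) then
      (if cnt + 1 = 3 then true else pvLoopA rest (cnt + 1))
    else pvLoopA rest cnt

def at_least_three_vowels (line : String) : Bool := pvLoopA line.toList 0

-- ===== PORT B =====
def at_least_three_vowels_alt (line : String) : Bool :=
  decide (3 ≤ ((["a", "e", "i", "o", "u"] : List String).map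
    (fun v => (PySem.Str.count line v : Int))).sum)

-- ===== PRECONDITION & SPEC =====
def Spec_at_least_three_vowels (line : String) (out : Bool) : Prop := out = at_least_three_vowels_alt line
instance (line : String) (out : Bool) : Decidable (Spec_at_least_three_vowels line out) := by unfold Spec_at_least_three_vowels; infer_instance

-- ===== CLAIM (what is proved, stated in full; the proofs are below) =====
def Claim_equal_at_least_three_vowels : Prop := ∀ (line : String), Dom_at_least_three_vowels line → Spec_at_least_three_vowels line (at_least_three_vowels line)

-- ===== LEMMAS AND PROOFS =====

-- counting a single-character substring is counting that character
theorem pv_count_go_singleton (c : Char) : ∀ (l : List Char) (fuel acc : Nat),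
    l.length ≤ fuel → PySem.Chars.count.go [c] fuel l acc = acc + l.count c := by
  intro l
  induction l with
  | nil => intro fuel acc _; cases fuel <;> simp [PySem.Chars.count.go]
  | cons h t ih =>
    intro fuel acc hle
    cases fuel with
    | zero => simp at hle
    | succ f =>
      simp only [List.length_cons, Nat.succ_le_succ_iff] at hle
      by_cases hc : h = c
      · subst hc
        simp [PySem.Chars.count.go, List.isPrefixOf, ih f (acc + 1) hle]
        omega
      · have : ([c].isPrefixOf (h :: t)) = false := by
          simp [List.isPrefixOf]; exact fun h' => hc h'.symm
        simp [PySem.Chars.count.go, this, ih f acc hle, hc]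

theorem pv_count_singleton (s : List Char) (c : Char) :
    PySem.Chars.count s [c] = s.count c := by
  have := pv_count_go_singleton c s s.length 0 (le_refl _)
  simp [PySem.Chars.count]
  omega

-- the five per-vowel counts sum to the number of vowel characters
theorem pv_sum_counts (l : List Char) :
    ((l.count 'a' : Int) + l.count 'e' + l.count 'i' + l.count 'o' + l.count 'u')
      = (l.countP (fun ch => ch ∈ (['a','e','i','o','u'] : List Char)) : Int) := by
  induction l with
  | nil => simp
  | cons h t ih =>
    simp only [List.count_cons, List.countP_cons]
    by_cases ha : h = 'a' <;> by_cases he : h = 'e' <;> by_cases hi : h = 'i' <;>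
      by_cases ho : h = 'o' <;> by_cases hu : h = 'u' <;>
      simp_all [List.mem_cons] <;> omega

-- A's early-exit loop computes "count + running total reaches 3"
theorem pv_loopA_eq (l : List Char) : ∀ (cnt : Int), 0 ≤ cnt → cnt < 3 →
    pvLoopA l cnt =
      decide (3 ≤ cnt + (l.countP (fun ch => ch ∈ (['a','e','i','o','u'] : List Char)) : Int)) := by
  induction l with
  | nil => intro cnt h0 h3; simp [pvLoopA]; omega
  | cons h t ih =>
    intro cnt h0 h3
    simp only [pvLoopA, List.countP_cons]
    by_cases hv : h ∈ (['a','e','i','o','u'] : List Char)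
    · simp only [hv, if_true]
      by_cases hc : cnt + 1 = 3
      · have : 0 ≤ (t.countP (fun ch => ch ∈ (['a','e','i','o','u'] : List Char)) : Int) := Int.natCast_nonneg _
        simp [hc]
        omega
      · rw [if_neg hc, ih (cnt + 1) (by omega) (by omega)]
        simp [hv]
        constructor <;> intro <;> omega
    · rw [if_neg hv, ih cnt h0 h3]
      simp [hv]

-- ===== VERDICT (by name: the statement is the Claim_ definition above) =====
theorem at_least_three_vowels_spec : Claim_equal_at_least_three_vowels := by
  intro line _
  unfold Spec_at_least_three_vowels at_least_three_vowels at_least_three_vowels_alt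
  rw [pv_loopA_eq line.toList 0 (by norm_num) (by norm_num)]
  simp only [List.map_cons, List.map_nil, List.sum_cons, List.sum_nil, PySem.Str.count_eq,
    show ("a" : String).toList = ['a'] from rfl, show ("e" : String).toList = ['e'] from rfl,
    show ("i" : String).toList = ['i'] from rfl, show ("o" : String).toList = ['o'] from rfl,
    show ("u" : String).toList = ['u'] from rfl, pv_count_singleton]
  rw [decide_eq_decide, ← pv_sum_counts]
  omega
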